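-- pv_equiv track=rewrite | github.com/miliar/Code_Jam_Webscraper | solutions_python/Problem_36/407.py | count_occurences
-- ===== SOURCE A (Python) =====
-- def count_occurences(target, string):
--     if len(target) == 0:
--         return 1
--
--     #find indexes of target[0] in string
--     indexes = []
--     index = string.find(target[0])
--     while index != -1:
--         indexes.append(index)
--         index = string.find(target[0], index + 1)
--
--     count = 0
--     for index in indexes:
--         count = (count + count_occurences(target[1:],
--                     string[index + 1:])) % 10000
--
--     return count
-- ===== SOURCE B (Python) =====
-- def count_occurences(target, string):
--     # One-pass subsequence-count DP over target prefixes, mod 10000.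
--     dp = [1] + [0] * len(target)
--     for ch in string:
--         dp = [1] + [(dp[j] + dp[j - 1]) % 10000 if target[j - 1] == ch else dp[j]
--                     for j in range(1, len(target) + 1)]
--     return dp[len(target)]
-- ===== Notes on version B (the rewrite author's own statement) =====
-- stated objective: faster
-- what changed: A counts occurrences by exponential branching recursion (for each index of target[0] in string it recurses on the remaining suffix); B is a single left-to-right pass over string maintaining a DP row of subsequence counts mod 10000 for every prefix of target.
import Mathlib
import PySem

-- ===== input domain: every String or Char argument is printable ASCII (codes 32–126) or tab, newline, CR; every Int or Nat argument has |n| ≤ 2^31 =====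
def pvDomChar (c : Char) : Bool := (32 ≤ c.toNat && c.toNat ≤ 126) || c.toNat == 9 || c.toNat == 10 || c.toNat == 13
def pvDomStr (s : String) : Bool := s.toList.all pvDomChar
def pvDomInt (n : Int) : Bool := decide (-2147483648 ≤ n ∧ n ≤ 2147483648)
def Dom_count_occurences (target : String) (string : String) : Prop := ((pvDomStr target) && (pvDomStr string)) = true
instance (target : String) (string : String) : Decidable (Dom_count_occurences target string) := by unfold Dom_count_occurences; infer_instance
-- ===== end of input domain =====

-- B replaces A's exponential branching recursion by a one-pass O(|target|·|string|) DP over target prefixes (mod 10000).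

-- ===== PORT A =====
-- helper: the while-loop collecting all indexes of c in s (string.find(c), then find(c, index+1), …),
-- in ascending order, exactly as A's loop produces them
def pvIdxs (c : Char) : List Char → List Nat
  | [] => []
  | x :: xs => if x = c then 0 :: (pvIdxs c xs).map (· + 1) else (pvIdxs c xs).map (· + 1)

def pvCountA : List Char → List Char → Int
  | [], _ => 1
  | c :: t, s =>
    (pvIdxs c s).foldl (fun count i => (count + pvCountA t (s.drop (i + 1))) % 10000) 0

def count_occurences (target : String) (string : String) : Int :=
  pvCountA target.toList string.toList

-- ===== PORT B =====
-- helper: the list comprehension producing the new row dp[1..m]; prev carries dp[j-1] (the old value)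
def pvRowStep (ch : Char) : Int → List Char → List Int → List Int
  | _, [], _ => []
  | _, _ :: _, [] => []
  | prev, c :: cs, d :: ds => (if c = ch then (d + prev) % 10000 else d) :: pvRowStep ch d cs ds

def count_occurences_alt (target : String) (string : String) : Int :=
  let t := target.toList
  let dp0 : List Int := 1 :: t.map (fun _ => 0)
  let dp := string.toList.foldl (fun dp ch => 1 :: pvRowStep ch 1 t dp.tail) dp0
  dp.getLastD 0

-- ===== PRECONDITION & SPEC =====
def Spec_count_occurences (target : String) (string : String) (out : Int) : Prop := out = count_occurences_alt target string
instance (target : String) (string : String) (out : Int) : Decidable (Spec_count_occurences target string out) := by unfold Spec_count_occurences; infer_instance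

-- ===== CLAIM (what is proved, stated in full; the proofs are below) =====
def Claim_equal_count_occurences : Prop := ∀ (target : String) (string : String), Dom_count_occurences target string → Spec_count_occurences target string (count_occurences target string)

-- ===== LEMMAS AND PROOFS =====

-- the mathematical subsequence count (no modulus)
def pvCnt : List Char → List Char → Nat
  | [], _ => 1
  | _ :: _, [] => 0
  | c :: t, x :: s => pvCnt (c :: t) s + (if x = c then pvCnt t s else 0)

theorem pvCnt_nil_left (s : List Char) : pvCnt [] s = 1 := by
  cases s <;> rfl

theorem pvCnt_nonnil_nil (t : List Char) (h : t ≠ []) : pvCnt t [] = 0 := by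
  cases t with
  | nil => exact absurd rfl h
  | cons c t => rfl

-- appending a char to the string, for a target written as u ++ [c]
theorem pvCnt_snoc (p : List Char) : ∀ (u : List Char) (c x : Char),
    pvCnt (u ++ [c]) (p ++ [x]) = pvCnt (u ++ [c]) p + (if x = c then pvCnt u p else 0) := by
  induction p with
  | nil =>
    intro u c x
    cases u with
    | nil => simp [pvCnt]
    | cons d u' =>
      show pvCnt (d :: (u' ++ [c])) [x] = pvCnt (d :: (u' ++ [c])) [] + _
      simp [pvCnt, pvCnt_nonnil_nil (u' ++ [c]) (by simp)]
  | cons y p' ih =>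
    intro u c x
    cases u with
    | nil =>
      show pvCnt [c] (y :: (p' ++ [x])) = pvCnt [c] (y :: p') + _
      have h1 := ih [] c x
      simp only [List.nil_append] at h1
      simp only [pvCnt, h1, pvCnt_nil_left]
      split_ifs <;> omega
    | cons d u' =>
      show pvCnt (d :: (u' ++ [c])) (y :: (p' ++ [x])) = pvCnt (d :: (u' ++ [c])) (y :: p') + _
      have h1 := ih (d :: u') c x
      have h2 := ih u' c x
      simp only [List.cons_append] at h1 ⊢
      simp only [pvCnt, h1, h2]
      split_ifs <;> omega

-- A-side: the first-match decomposition of the count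
theorem pvCnt_cons_eq_sum (c : Char) (t : List Char) : ∀ (s : List Char),
    pvCnt (c :: t) s = ((pvIdxs c s).map (fun i => pvCnt t (s.drop (i + 1)))).sum := by
  intro s
  induction s with
  | nil => simp [pvCnt, pvIdxs]
  | cons x s ih =>
    simp only [pvIdxs, pvCnt]
    by_cases hx : x = c
    · rw [if_pos hx, if_pos hx]
      simp only [List.map_cons, List.map_map, List.sum_cons, Function.comp_def,
        List.drop_succ_cons, List.drop_zero]
      rw [ih]; omega
    · rw [if_neg hx, if_neg hx]
      simp only [List.map_map, Function.comp_def, List.drop_succ_cons]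
      rw [ih]; simp

theorem pvFoldl_mod (g : Nat → Int) : ∀ (l : List Nat) (a : Int),
    l.foldl (fun acc i => (acc + g i) % 10000) (a % 10000) = (a + (l.map g).sum) % 10000 := by
  intro l
  induction l with
  | nil => intro a; simp
  | cons i l ih =>
    intro a
    show List.foldl _ ((a % 10000 + g i) % 10000) l = _
    rw [Int.emod_add_emod, ← Int.emod_emod_of_dvd (a + g i) (dvd_refl 10000), ih]
    simp [add_assoc]

theorem pvFoldl_ext {α β : Type} (f g : β → α → β) (h : ∀ b a, f b a = g b a) :
    ∀ (l : List α) (b : β), l.foldl f b = l.foldl g b := by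
  intro l
  induction l with
  | nil => intro b; rfl
  | cons a l ih => intro b; rw [List.foldl_cons, List.foldl_cons, h b a, ih]

theorem pvList_sum_cast (f : Nat → Nat) : ∀ (l : List Nat),
    (l.map (fun i => (f i : Int))).sum = ((l.map f).sum : Int) := by
  intro l
  induction l with
  | nil => rfl
  | cons i l ih => simp [ih]

theorem pvCountA_eq : ∀ (t : List Char), ∀ (s : List Char),
    pvCountA t s = (pvCnt t s : Int) % 10000 := by
  intro t
  induction t with
  | nil => intro s; simp [pvCountA, pvCnt_nil_left]
  | cons c t ih =>
    intro s
    show (pvIdxs c s).foldl (fun count i => (count + pvCountA t (s.drop (i + 1))) % 10000) 0 = _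
    have hmod : ∀ (acc c : Int), (acc + c % 10000) % 10000 = (acc + c) % 10000 := by
      intro acc c
      conv_lhs => rw [Int.add_emod, Int.emod_emod_of_dvd _ (dvd_refl 10000), ← Int.add_emod]
    have h0 : ((0 : Int) % 10000) = 0 := by decide
    calc (pvIdxs c s).foldl (fun count i => (count + pvCountA t (s.drop (i + 1))) % 10000) 0
        = (pvIdxs c s).foldl
            (fun count i => (count + (fun i => (pvCnt t (s.drop (i + 1)) : Int)) i) % 10000)
            ((0 : Int) % 10000) := by
          rw [h0]
          exact pvFoldl_ext _ _ (by intro acc i; rw [ih]; exact hmod acc _) _ 0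
      _ = (0 + ((pvIdxs c s).map (fun i => (pvCnt t (s.drop (i + 1)) : Int))).sum) % 10000 :=
          pvFoldl_mod _ _ 0
      _ = (pvCnt (c :: t) s : Int) % 10000 := by
          rw [zero_add, pvList_sum_cast (fun i => pvCnt t (s.drop (i + 1)))]
          rw [pvCnt_cons_eq_sum]

-- B-side: the row of mod-reduced prefix counts
def pvRow : List Char → List Char → List Char → List Int
  | _, [], _ => []
  | u, c :: cs, p => ((pvCnt (u ++ [c]) p : Int) % 10000) :: pvRow (u ++ [c]) cs p

theorem pvRow_nil (t' : List Char) : ∀ (u : List Char), pvRow u t' [] = t'.map (fun _ => (0 : Int)) := by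
  induction t' with
  | nil => intro u; rfl
  | cons c cs ih =>
    intro u
    simp [pvRow, pvCnt_nonnil_nil (u ++ [c]) (by simp), ih]

theorem pvRowStep_correct (x : Char) (p : List Char) : ∀ (t' u : List Char),
    pvRowStep x ((pvCnt u p : Int) % 10000) t' (pvRow u t' p) = pvRow u t' (p ++ [x]) := by
  intro t'
  induction t' with
  | nil => intro u; rfl
  | cons c cs ih =>
    intro u
    simp only [pvRow, pvRowStep, ih (u ++ [c])]
    congr 1
    rw [pvCnt_snoc p u c x]
    by_cases hc : c = x
    · rw [if_pos hc, if_pos hc.symm]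
      push_cast
      conv_rhs => rw [Int.add_emod]
    · rw [if_neg hc, if_neg (fun h => hc h.symm), add_zero]

theorem pvFold_invariant (t : List Char) : ∀ (s' p : List Char),
    s'.foldl (fun dp ch => 1 :: pvRowStep ch 1 t dp.tail) (1 :: pvRow [] t p)
      = 1 :: pvRow [] t (p ++ s') := by
  intro s'
  induction s' with
  | nil => intro p; simp
  | cons x s' ih =>
    intro p
    show List.foldl _ (1 :: pvRowStep x 1 t (1 :: pvRow [] t p).tail) s' = _
    have h1 : ((pvCnt [] p : Int) % 10000) = 1 := by rw [pvCnt_nil_left]; rfl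
    have := pvRowStep_correct x p t []
    rw [h1] at this
    simp only [List.tail_cons, this, ih (p ++ [x])]
    simp

theorem pvRow_getLastD (p : List Char) : ∀ (t' : List Char) (u : List Char) (d : Int), t' ≠ [] →
    (pvRow u t' p).getLastD d = (pvCnt (u ++ t') p : Int) % 10000 := by
  intro t'
  induction t' with
  | nil => intro u d h; exact absurd rfl h
  | cons c cs ih =>
    intro u d h
    cases cs with
    | nil => simp [pvRow]
    | cons c' cs' =>
      show ((((pvCnt (u ++ [c]) p : Int)) % 10000) :: pvRow (u ++ [c]) (c' :: cs') p).getLastD d = _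
      rw [List.getLastD_cons, ih (u ++ [c]) _ (by simp)]
      simp

theorem pvAlt_eq (target string : String) :
    count_occurences_alt target string = (pvCnt target.toList string.toList : Int) % 10000 := by
  show (string.toList.foldl
      (fun dp ch => 1 :: pvRowStep ch 1 target.toList dp.tail)
      (1 :: target.toList.map (fun _ => 0))).getLastD 0 = _
  rw [← pvRow_nil target.toList []]
  rw [pvFold_invariant target.toList string.toList []]
  simp only [List.nil_append]
  cases ht : target.toList with
  | nil => simp [pvRow, pvCnt_nil_left]
  | cons c cs =>
    rw [List.getLastD_cons, pvRow_getLastD string.toList (c :: cs) [] 1 (by simp)]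
    simp

-- ===== VERDICT (by name: the statement is the Claim_ definition above) =====
theorem count_occurences_spec : Claim_equal_count_occurences := by
  intro target string _
  show count_occurences target string = count_occurences_alt target string
  rw [pvAlt_eq]
  exact pvCountA_eq target.toList string.toList
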